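-- pv_equiv track=rewrite | github.com/smpanaro/Tufts-COMP20-Classwork | transit/data_gen/convert-mbta-data.py | multiline_list_to_pair_list
-- ===== SOURCE A (Python) =====
-- def multiline_list_to_pair_list(arr):
--     if len(arr) == 0:
--         return arr
--     to_ret = []
--     if type(arr[0]) is not list:
--         to_ret.append(arr)
--     else:
--         for child in arr:
--             to_ret.extend(multiline_list_to_pair_list(child))
--     return to_ret
-- ===== SOURCE B (Python) =====
-- def multiline_list_to_pair_list(arr):
--     # One-pass comprehension: keep the nonempty rows in order.
--     return [row for row in arr if row]
-- ===== Notes on version B (the rewrite author's own statement) =====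
-- stated objective: simpler
-- what changed: A's recursive flatten with per-child extend is replaced by a single filter comprehension keeping nonempty rows (on list-of-lists-of-strings input the recursion is exactly that).
import Mathlib
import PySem

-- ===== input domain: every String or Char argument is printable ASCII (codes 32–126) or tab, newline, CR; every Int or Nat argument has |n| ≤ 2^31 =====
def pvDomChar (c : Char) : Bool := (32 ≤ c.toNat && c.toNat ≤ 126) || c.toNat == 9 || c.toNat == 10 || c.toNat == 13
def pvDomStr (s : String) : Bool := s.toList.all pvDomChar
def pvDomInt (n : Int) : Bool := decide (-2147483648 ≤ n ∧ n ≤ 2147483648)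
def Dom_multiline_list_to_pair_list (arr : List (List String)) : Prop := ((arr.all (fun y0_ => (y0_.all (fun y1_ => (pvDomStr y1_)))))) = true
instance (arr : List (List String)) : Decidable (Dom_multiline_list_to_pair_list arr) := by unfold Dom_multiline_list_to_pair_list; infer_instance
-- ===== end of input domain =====

-- B replaces A's recursive flatten-with-extend by a single filter comprehension
-- keeping the nonempty rows (simpler; on List (List String) input the recursion
-- reduces to exactly that).

-- ===== PORT A =====
-- A's recursive call on a child : List String; there child[0] is a String (not a
-- list), so: empty child returns itself ([]), else the 'append arr' branch fires.
def mltpl_child (child : List String) : List (List String) :=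
  if child.length = 0 then [] else [child]

def multiline_list_to_pair_list (arr : List (List String)) : List (List String) :=
  if arr.length = 0 then arr
  else arr.foldl (fun to_ret child => to_ret ++ mltpl_child child) []

-- ===== PORT B =====
def multiline_list_to_pair_list_alt (arr : List (List String)) : List (List String) :=
  arr.filter (fun row => !row.isEmpty)

-- ===== PRECONDITION & SPEC =====
def Spec_multiline_list_to_pair_list (arr : List (List String)) (out : List (List String)) : Prop := out = multiline_list_to_pair_list_alt arr
instance (arr : List (List String)) (out : List (List String)) : Decidable (Spec_multiline_list_to_pair_list arr out) := by unfold Spec_multiline_list_to_pair_list; infer_instance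

-- ===== CLAIM (what is proved, stated in full; the proofs are below) =====
def Claim_equal_multiline_list_to_pair_list : Prop := ∀ (arr : List (List String)), Dom_multiline_list_to_pair_list arr → Spec_multiline_list_to_pair_list arr (multiline_list_to_pair_list arr)

-- ===== LEMMAS AND PROOFS =====
lemma mltpl_foldl_filter (arr : List (List String)) (acc : List (List String)) :
    arr.foldl (fun to_ret child => to_ret ++ mltpl_child child) acc
      = acc ++ arr.filter (fun row => !row.isEmpty) := by
  induction arr generalizing acc with
  | nil => simp
  | cons c t ih =>
    rw [List.foldl_cons, ih]
    simp only [List.filter_cons, mltpl_child]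
    cases c <;> simp

-- ===== VERDICT (by name: the statement is the Claim_ definition above) =====
theorem multiline_list_to_pair_list_spec : Claim_equal_multiline_list_to_pair_list := by
  intro arr _
  unfold Spec_multiline_list_to_pair_list multiline_list_to_pair_list multiline_list_to_pair_list_alt
  cases arr with
  | nil => simp
  | cons c t =>
    have h : (c :: t).length ≠ 0 := by simp
    rw [if_neg h, mltpl_foldl_filter]
    simp
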